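-- pv_equiv track=rewrite | github.com/yzq-zz/Personnel_agent | memory2/rule_schema.py | _normalize_schema_list
-- ===== SOURCE A (Python) =====
-- from typing import Any
--
-- def _normalize_schema_list(value: Any) -> list[str]:
--     if not isinstance(value, list):
--         return []
--     return sorted(
--         {
--             str(item).strip().lower()
--             for item in value
--             if isinstance(item, str) and str(item).strip()
--         }
--     )
-- ===== SOURCE B (Python) =====
-- def _insert_unique(sorted_list, s):
--     """Insert s into a strictly sorted list, keeping it sorted and duplicate-free."""
--     out = []
--     i = 0
--     while i < len(sorted_list) and sorted_list[i] < s: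
--         out.append(sorted_list[i])
--         i += 1
--     if i < len(sorted_list) and sorted_list[i] == s:
--         return sorted_list
--     return out + [s] + sorted_list[i:]
--
-- def _normalize_schema_list(value):
--     if not isinstance(value, list):
--         return []
--     result = []
--     for item in value:
--         if not isinstance(item, str):
--             continue
--         s = item.strip().lower()
--         if s:
--             result = _insert_unique(result, s)
--     return result
-- ===== Notes on version B (the rewrite author's own statement) =====
-- stated objective: alternative
-- what changed: Replaces the hash-set comprehension followed by a library sort with a single online pass that maintains a strictly sorted duplicate-free accumulator, inserting each normalized string by ordered insertion (no set, no sort call).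
import Mathlib
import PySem

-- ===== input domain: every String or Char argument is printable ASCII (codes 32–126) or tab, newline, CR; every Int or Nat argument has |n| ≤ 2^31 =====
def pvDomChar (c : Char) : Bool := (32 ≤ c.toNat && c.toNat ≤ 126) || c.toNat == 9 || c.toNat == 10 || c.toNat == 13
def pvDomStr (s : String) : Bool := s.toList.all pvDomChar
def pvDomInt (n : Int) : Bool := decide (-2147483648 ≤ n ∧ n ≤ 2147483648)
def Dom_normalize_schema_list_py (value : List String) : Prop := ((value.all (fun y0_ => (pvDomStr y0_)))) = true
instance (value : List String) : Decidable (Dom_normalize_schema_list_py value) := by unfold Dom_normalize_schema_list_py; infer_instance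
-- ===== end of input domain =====

-- B replaces A's hash-set comprehension + library sort by a single online pass that keeps
-- a strictly sorted duplicate-free accumulator via ordered insertion (alternative decomposition).

-- ===== PORT A =====
-- set comprehension {str(item).strip().lower() for item in value if ...} then sorted(...)
def normalize_schema_list_py (value : List String) : List String :=
  PySem.List.sorted
    (PySem.Set.ofList
      ((value.filter (fun item => PySem.Str.strip item != "")).map
        (fun item => PySem.Str.lower (PySem.Str.strip item))))
    (fun x => x) false

-- ===== PORT B =====
-- _insert_unique: walk the sorted list past elements < s; if s is already present return the
-- list unchanged, otherwise splice s in at that position.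
def pvInsertUnique : List String → String → List String
  | [], s => [s]
  | y :: t, s =>
    if y < s then y :: pvInsertUnique t s
    else if y = s then y :: t
    else s :: y :: t

-- loop body: normalize item; skip if empty, else ordered insertion into the accumulator
def pvStep (result : List String) (item : String) : List String :=
  let s := PySem.Str.lower (PySem.Str.strip item)
  if s = "" then result else pvInsertUnique result s

-- one pass over value: normalize each string and insert it into the sorted accumulator
def normalize_schema_list_py_alt (value : List String) : List String :=
  value.foldl pvStep []

-- ===== PRECONDITION & SPEC =====
def Spec_normalize_schema_list_py (value : List String) (out : List String) : Prop := out = normalize_schema_list_py_alt value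
instance (value : List String) (out : List String) : Decidable (Spec_normalize_schema_list_py value out) := by unfold Spec_normalize_schema_list_py; infer_instance

-- ===== CLAIM (what is proved, stated in full; the proofs are below) =====
def Claim_equal_normalize_schema_list_py : Prop := ∀ (value : List String), Dom_normalize_schema_list_py value → Spec_normalize_schema_list_py value (normalize_schema_list_py value)

-- ===== LEMMAS AND PROOFS =====

lemma mem_pvInsertUnique (a s : String) : ∀ (l : List String),
    (a ∈ pvInsertUnique l s ↔ a = s ∨ a ∈ l) := by
  intro l
  induction l with
  | nil => simp [pvInsertUnique]
  | cons y t ih =>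
    by_cases h1 : y < s
    · simp [pvInsertUnique, h1, ih]; tauto
    · by_cases h2 : y = s
      · subst h2; simp [pvInsertUnique]
      · simp [pvInsertUnique, h1, h2]

lemma pairwise_pvInsertUnique (s : String) : ∀ (l : List String),
    l.Pairwise (· < ·) → (pvInsertUnique l s).Pairwise (· < ·) := by
  intro l
  induction l with
  | nil => intro _; simp [pvInsertUnique]
  | cons y t ih =>
    intro hp
    have hyt : ∀ b ∈ t, y < b := fun b hb => List.rel_of_pairwise_cons hp hb
    have hpt : t.Pairwise (· < ·) := hp.of_cons
    by_cases h1 : y < s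
    · simp only [pvInsertUnique, h1, if_true]
      refine List.Pairwise.cons ?_ (ih hpt)
      intro b hb
      rcases (mem_pvInsertUnique b s t).mp hb with rfl | hb'
      · exact h1
      · exact hyt b hb'
    · by_cases h2 : y = s
      · subst h2; simpa [pvInsertUnique, h1] using hp
      · have hsy : s < y := lt_of_le_of_ne (le_of_not_gt h1) (Ne.symm h2)
        simp only [pvInsertUnique, h1, if_false, h2]
        refine List.Pairwise.cons ?_ hp
        intro b hb
        rcases List.mem_cons.mp hb with rfl | hb'
        · exact hsy
        · exact lt_trans hsy (hyt b hb')

/-- The normalized strings A's filter+map produces from `value`. -/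
def pvNorm (value : List String) : List String :=
  (value.filter (fun item => PySem.Str.strip item != "")).map
    (fun item => PySem.Str.lower (PySem.Str.strip item))

lemma lower_eq_empty_iff (x : String) : PySem.Str.lower x = "" ↔ x = "" := by
  constructor
  · intro h
    have h' := congrArg String.toList h
    rw [PySem.Str.toList_lower] at h'
    have hnil : x.toList = [] := by
      cases hx : x.toList with
      | nil => rfl
      | cons c cs => rw [hx] at h'; simp [PySem.Chars.lower] at h'
    exact String.toList_inj.mp (by simpa using hnil)
  · intro h; subst h; rfl

lemma pvNorm_cons_pos (item : String) (rest : List String)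
    (h : PySem.Str.strip item ≠ "") :
    pvNorm (item :: rest) = PySem.Str.lower (PySem.Str.strip item) :: pvNorm rest := by
  unfold pvNorm
  rw [List.filter_cons, if_pos (by simpa using h), List.map_cons]

lemma pvNorm_cons_neg (item : String) (rest : List String)
    (h : PySem.Str.strip item = "") :
    pvNorm (item :: rest) = pvNorm rest := by
  unfold pvNorm
  rw [List.filter_cons, if_neg (by simp [h])]

lemma foldl_insert_inv : ∀ (value acc : List String), acc.Pairwise (· < ·) →
    (value.foldl pvStep acc).Pairwise (· < ·) ∧
    ∀ a, a ∈ value.foldl pvStep acc ↔ a ∈ acc ∨ a ∈ pvNorm value := by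
  intro value
  induction value with
  | nil => intro acc hp; refine ⟨hp, fun a => ?_⟩; simp [pvNorm]
  | cons item rest ih =>
    intro acc hp
    by_cases hs : PySem.Str.lower (PySem.Str.strip item) = ""
    · have hstrip : PySem.Str.strip item = "" := (lower_eq_empty_iff _).mp hs
      rw [List.foldl_cons]
      rw [show pvStep acc item = acc from by
        show (if PySem.Str.lower (PySem.Str.strip item) = "" then acc
              else pvInsertUnique acc (PySem.Str.lower (PySem.Str.strip item))) = acc
        rw [if_pos hs]]
      obtain ⟨hp', hm'⟩ := ih acc hp
      refine ⟨hp', fun a => ?_⟩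
      rw [hm', pvNorm_cons_neg item rest hstrip]
    · have hstrip : PySem.Str.strip item ≠ "" := fun h => hs (by rw [h]; rfl)
      rw [List.foldl_cons]
      rw [show pvStep acc item = pvInsertUnique acc (PySem.Str.lower (PySem.Str.strip item)) from by
        show (if PySem.Str.lower (PySem.Str.strip item) = "" then acc
              else pvInsertUnique acc (PySem.Str.lower (PySem.Str.strip item))) = _
        rw [if_neg hs]]
      obtain ⟨hp', hm'⟩ := ih (pvInsertUnique acc (PySem.Str.lower (PySem.Str.strip item)))
        (pairwise_pvInsertUnique _ acc hp)
      refine ⟨hp', fun a => ?_⟩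
      rw [hm', mem_pvInsertUnique, pvNorm_cons_pos item rest hstrip, List.mem_cons]
      constructor
      · rintro ((h | h) | h)
        exacts [Or.inr (Or.inl h), Or.inl h, Or.inr (Or.inr h)]
      · rintro (h | h | h)
        exacts [Or.inl (Or.inr h), Or.inl (Or.inl h), Or.inr h]

-- ===== VERDICT (by name: the statement is the Claim_ definition above) =====
theorem normalize_schema_list_py_spec : Claim_equal_normalize_schema_list_py := by
  intro value _
  unfold Spec_normalize_schema_list_py normalize_schema_list_py normalize_schema_list_py_alt
  obtain ⟨hp, hm⟩ := foldl_insert_inv value [] (by simp)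
  set B := value.foldl pvStep [] with hB
  have hnodup : B.Nodup := hp.imp (fun h => ne_of_lt h)
  have hmem : ∀ a, a ∈ B ↔ a ∈ PySem.Set.ofList (pvNorm value) := by
    intro a
    rw [hm a, PySem.Set.mem_ofList]
    simp
  have hperm : B.Perm (PySem.Set.ofList (pvNorm value)) :=
    (List.perm_ext_iff_of_nodup hnodup (PySem.Set.nodup_ofList _)).mpr hmem
  exact PySem.List.sorted_eq_of_perm_of_pairwise_lt (PySem.Set.ofList (pvNorm value)) B
    (fun x => x) hperm hp
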